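-- pv_equiv track=rewrite | github.com/dylanjkennedy/GameDataMiner | GameDataMiner.py | get_rush_plays_down
-- ===== SOURCE A (Python) =====
-- def get_rush_plays_down(plays, winner, loser, down):
--     rush_plays = [0, 0]
--     for play in plays:
--         if play['run_pass'] == 'R' and play['down'] == down:
--             if play['offense'] == winner:
--                 rush_plays[0] += 1
--             else:
--                 rush_plays[1] += 1
--     return rush_plays
-- ===== SOURCE B (Python) =====
-- def get_rush_plays_down(plays, winner, loser, down):
--     offenses = [p['offense'] for p in plays
--                 if p['run_pass'] == 'R' and p['down'] == down]
--     return [sum(1 for o in offenses if o == winner),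
--             sum(1 for o in offenses if o != winner)]
-- ===== Notes on version B (the rewrite author's own statement) =====
-- stated objective: alternative
-- what changed: Replaces the single branching accumulation loop with a filtered projection of offenses followed by two independent counts (== winner / != winner), returned as the pair of counts.
import Mathlib
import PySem

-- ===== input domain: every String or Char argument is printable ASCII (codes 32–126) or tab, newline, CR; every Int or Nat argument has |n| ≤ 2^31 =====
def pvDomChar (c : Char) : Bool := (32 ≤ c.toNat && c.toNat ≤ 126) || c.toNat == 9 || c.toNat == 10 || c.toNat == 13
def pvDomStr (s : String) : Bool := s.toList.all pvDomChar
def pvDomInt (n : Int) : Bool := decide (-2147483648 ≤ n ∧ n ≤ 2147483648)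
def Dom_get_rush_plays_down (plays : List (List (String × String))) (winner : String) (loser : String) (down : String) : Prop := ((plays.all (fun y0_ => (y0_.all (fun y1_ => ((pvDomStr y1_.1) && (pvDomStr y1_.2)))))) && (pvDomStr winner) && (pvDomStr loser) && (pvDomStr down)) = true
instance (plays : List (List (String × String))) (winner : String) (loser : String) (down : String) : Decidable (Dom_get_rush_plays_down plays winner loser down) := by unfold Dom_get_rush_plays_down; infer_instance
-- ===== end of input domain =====

-- B replaces A's single branching accumulation loop by a filtered projection of offenses
-- and two independent counts; same cost, different decomposition.


-- ===== PORT A =====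
-- Python dict lookup on the association list (first match), '' default: admitted inputs
-- (Pre_) always have the key present when it is consulted.
def pvLookup (p : List (String × String)) (k : String) : String :=
  ((p.find? (fun kv => kv.1 == k)).map (·.2)).getD ""

def get_rush_plays_down (plays : List (List (String × String))) (winner : String) (loser : String) (down : String) : List Int :=
  let rp : Int × Int := plays.foldl (fun acc play =>
    if pvLookup play "run_pass" = "R" ∧ pvLookup play "down" = down then
      if pvLookup play "offense" = winner then (acc.1 + 1, acc.2) else (acc.1, acc.2 + 1)
    else acc) (0, 0)
  [rp.1, rp.2]

-- ===== PORT B =====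
def get_rush_plays_down_alt (plays : List (List (String × String))) (winner : String) (loser : String) (down : String) : List Int :=
  let offenses : List String :=
    (plays.filter (fun p => pvLookup p "run_pass" = "R" ∧ pvLookup p "down" = down)).map
      (fun p => pvLookup p "offense")
  [ (offenses.countP (fun o => o == winner) : Int),
    (offenses.countP (fun o => o != winner) : Int) ]

-- ===== PRECONDITION & SPEC =====
-- Pre_ excludes exactly the inputs where Python A raises KeyError: a play missing
-- 'run_pass', or missing 'down' when run_pass is 'R', or missing 'offense' when
-- the play is a rush on the queried down (both programs access keys identically).
def Pre_get_rush_plays_down (plays : List (List (String × String))) (winner : String) (loser : String) (down : String) : Prop :=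
  ∀ p ∈ plays,
    (p.find? (fun kv => kv.1 == "run_pass")).isSome ∧
    (pvLookup p "run_pass" = "R" →
      (p.find? (fun kv => kv.1 == "down")).isSome ∧
      (pvLookup p "down" = down → (p.find? (fun kv => kv.1 == "offense")).isSome))

instance (plays : List (List (String × String))) (winner : String) (loser : String) (down : String) : Decidable (Pre_get_rush_plays_down plays winner loser down) := by unfold Pre_get_rush_plays_down; infer_instance

def pvWitness_get_rush_plays_down : (List (List (String × String))) × String × String × String :=
  ([[("run_pass", "R"), ("down", "1"), ("offense", "A")], [("run_pass", "P")]], "A", "B", "1")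

def Spec_get_rush_plays_down (plays : List (List (String × String))) (winner : String) (loser : String) (down : String) (out : List Int) : Prop := out = get_rush_plays_down_alt plays winner loser down
instance (plays : List (List (String × String))) (winner : String) (loser : String) (down : String) (out : List Int) : Decidable (Spec_get_rush_plays_down plays winner loser down out) := by unfold Spec_get_rush_plays_down; infer_instance

-- ===== CLAIM =====
def Claim_equal_get_rush_plays_down : Prop := ∀ (plays : List (List (String × String))) (winner : String) (loser : String) (down : String), Dom_get_rush_plays_down plays winner loser down → Pre_get_rush_plays_down plays winner loser down → Spec_get_rush_plays_down plays winner loser down (get_rush_plays_down plays winner loser down)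

-- ===== LEMMAS AND PROOFS =====
theorem fold_counts (plays : List (List (String × String))) (winner down : String) (acc : Int × Int) :
    plays.foldl (fun acc play =>
      if pvLookup play "run_pass" = "R" ∧ pvLookup play "down" = down then
        if pvLookup play "offense" = winner then (acc.1 + 1, acc.2) else (acc.1, acc.2 + 1)
      else acc) acc
    = (acc.1 + ((plays.filter (fun p => pvLookup p "run_pass" = "R" ∧ pvLookup p "down" = down)).map (fun p => pvLookup p "offense")).countP (fun o => o == winner),
       acc.2 + ((plays.filter (fun p => pvLookup p "run_pass" = "R" ∧ pvLookup p "down" = down)).map (fun p => pvLookup p "offense")).countP (fun o => o != winner)) := by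
  induction plays generalizing acc with
  | nil => simp
  | cons p rest ih =>
    simp only [List.foldl_cons, List.filter_cons]
    by_cases h : pvLookup p "run_pass" = "R" ∧ pvLookup p "down" = down
    · by_cases ho : pvLookup p "offense" = winner <;>
        simp [h, ho, ih] <;> ring_nf
    · simp [h, ih]

-- ===== VERDICT =====
theorem get_rush_plays_down_spec : Claim_equal_get_rush_plays_down := by
  intro plays winner loser down _ _
  unfold Spec_get_rush_plays_down get_rush_plays_down get_rush_plays_down_alt
  simp [fold_counts]
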